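-- pv_equiv track=rewrite | github.com/Arsen1302/Code-copy-detector | TestData/solutions/problem_1563_3.py | solution_1563_3
-- ===== SOURCE A (Python) =====
-- def solution_1563_3(pressedKeys):
--     n = len(pressedKeys)
--
--     dp = [0]*(n+1)
--
--     dp[0], dp[1] = 1, 1
--
--     for i in range(2,n+1):
--         dp[i] += dp[i-1]
--
--         if i > 1 and pressedKeys[i-1] == pressedKeys[i-2]:
--             dp[i] += dp[i-2]
--
--         if i > 2 and pressedKeys[i-1] == pressedKeys[i-2] == pressedKeys[i-3]:
--             dp[i] += dp[i-3]
--
--         if pressedKeys[i-1] == "7" or pressedKeys[i-1] == "9":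
--             if i > 3 and pressedKeys[i-1] == pressedKeys[i-2] == pressedKeys[i-3] == pressedKeys[i-4]:
--                 dp[i] += dp[i-4]
--
--     return dp[-1]%(10**9+7)
-- ===== SOURCE B (Python) =====
-- def solution_1563_3(pressedKeys):
--     MOD = 10**9 + 7
--     # split into maximal runs of identical characters
--     runs = []
--     cur = pressedKeys[0]
--     cnt = 0
--     for ch in pressedKeys:
--         if ch == cur:
--             cnt += 1
--         else:
--             runs.append((cur, cnt))
--             cur, cnt = ch, 1
--     runs.append((cur, cnt))
--     total = 1
--     for ch, length in runs:
--         total *= _tilings(ch == '7' or ch == '9', length)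
--     return total % MOD
--
--
-- def _tilings(four, L):
--     # number of ways to split a run of length L into groups of size <= 3 (<= 4 if four)
--     a, b, c, d = 0, 0, 0, 1
--     for _ in range(L):
--         a, b, c, d = b, c, d, b + c + d + (a if four else 0)
--     return d
-- ===== Notes on version B (the rewrite author's own statement) =====
-- stated objective: faster
-- what changed: Instead of one dp array over every index with repeated 2/3/4-wide character-equality chains, B splits the string once into maximal runs of equal characters, counts the groupings of each run with a constant-space tiling recurrence f(L)=f(L-1)+f(L-2)+f(L-3), plus f(L-4) on the two four-letter keys, and multiplies the per-run counts.
import Mathlib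
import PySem

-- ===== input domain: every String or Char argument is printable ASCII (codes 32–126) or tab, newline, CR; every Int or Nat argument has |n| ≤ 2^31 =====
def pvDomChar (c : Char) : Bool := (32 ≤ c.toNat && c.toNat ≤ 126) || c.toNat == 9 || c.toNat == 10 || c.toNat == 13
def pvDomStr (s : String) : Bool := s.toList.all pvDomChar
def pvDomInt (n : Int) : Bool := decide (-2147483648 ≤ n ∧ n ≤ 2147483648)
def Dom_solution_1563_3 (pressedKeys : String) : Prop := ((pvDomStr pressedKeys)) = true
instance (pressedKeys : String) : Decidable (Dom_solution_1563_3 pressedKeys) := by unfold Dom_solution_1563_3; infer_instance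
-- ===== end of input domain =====

-- B replaces A's single dp array over indices by a run-decomposition with a per-run tiling
-- recurrence; proved to return the same value on every non-empty input (both raise on "").

set_option maxHeartbeats 1000000


-- ===== PORT A =====
-- A-side helper: the body of A's `for i in range(2, n+1)` loop; dp is kept reversed
-- (head = most recently written entry dp[i-1]).
def stepA (cs : List Char) (dp : List Int) (i : Nat) : List Int :=
  (dp.headD 0
    + (if 1 < i ∧ cs.getD (i-1) ' ' = cs.getD (i-2) ' ' then dp.getD 1 0 else 0)
    + (if 2 < i ∧ cs.getD (i-1) ' ' = cs.getD (i-2) ' ' ∧ cs.getD (i-2) ' ' = cs.getD (i-3) ' '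
       then dp.getD 2 0 else 0)
    + (if (cs.getD (i-1) ' ' = '7' ∨ cs.getD (i-1) ' ' = '9')
          ∧ 3 < i ∧ cs.getD (i-1) ' ' = cs.getD (i-2) ' '
          ∧ cs.getD (i-2) ' ' = cs.getD (i-3) ' ' ∧ cs.getD (i-3) ' ' = cs.getD (i-4) ' '
       then dp.getD 3 0 else 0)) :: dp

-- Port of A: dp[0]=dp[1]=1, then the loop i = 2..n; returns dp[-1] % (10^9+7).
-- (On the empty string Python raises IndexError at `dp[1] = 1`; excluded by Pre_.)
def solution_1563_3 (pressedKeys : String) : Int :=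
  let cs := pressedKeys.toList
  let n := cs.length
  let dpRev := (List.range' 2 (n - 1)).foldl (stepA cs) [1, 1]
  dpRev.headD 0 % 1000000007

-- ===== PORT B =====
-- B-side helper: _tilings(four, L), rolling window (f(i-4), f(i-3), f(i-2), f(i-1)).
def altTilings (four : Bool) (L : Nat) : Int :=
  let st := (List.range L).foldl
    (fun (s : Int × Int × Int × Int) _ =>
      (s.2.1, s.2.2.1, s.2.2.2, s.2.1 + s.2.2.1 + s.2.2.2 + (if four then s.1 else 0)))
    (0, 0, 0, 1)
  st.2.2.2

-- B-side helper: the body of B's run-collecting loop; state = (runs so far, cur, cnt).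
def stepR (s : List (Char × Nat) × Char × Nat) (ch : Char) : List (Char × Nat) × Char × Nat :=
  if ch = s.2.1 then (s.1, s.2.1, s.2.2 + 1) else (s.1 ++ [(s.2.1, s.2.2)], ch, 1)

-- Port of B: split into maximal runs, multiply the per-run tiling counts, one final mod.
-- (On the empty string Python raises IndexError at `pressedKeys[0]`; excluded by Pre_.)
def solution_1563_3_alt (pressedKeys : String) : Int :=
  match pressedKeys.toList with
  | [] => 0
  | c0 :: rest =>
    let st := (c0 :: rest).foldl stepR ([], c0, 0)
    let runs := st.1 ++ [(st.2.1, st.2.2)]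
    let total := runs.foldl (fun (t : Int) p => t * altTilings (p.1 == '7' || p.1 == '9') p.2) 1
    total % 1000000007

-- ===== PRECONDITION & SPEC =====
-- Pre_ excludes exactly the empty string, on which both A and B raise IndexError.
def Pre_solution_1563_3 (pressedKeys : String) : Prop := pressedKeys ≠ ""
instance (pressedKeys : String) : Decidable (Pre_solution_1563_3 pressedKeys) := by
  unfold Pre_solution_1563_3; infer_instance

def pvWitness_solution_1563_3 : String := "227799"

def Spec_solution_1563_3 (pressedKeys : String) (out : Int) : Prop := out = solution_1563_3_alt pressedKeys
instance (pressedKeys : String) (out : Int) : Decidable (Spec_solution_1563_3 pressedKeys out) := by unfold Spec_solution_1563_3; infer_instance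

-- ===== CLAIM (what is proved, stated in full; the proofs are below) =====
def Claim_equal_solution_1563_3 : Prop := ∀ (pressedKeys : String), Dom_solution_1563_3 pressedKeys → Pre_solution_1563_3 pressedKeys → Spec_solution_1563_3 pressedKeys (solution_1563_3 pressedKeys)

-- ===== LEMMAS AND PROOFS =====

-- The common mathematical value: G l = number of groupings of the REVERSED prefix l
-- (= A's dp entry for that prefix, before the final mod).
def G : List Char → Int
  | [] => 1
  | c :: t =>
    G t
    + (if t[0]? = some c then G (t.drop 1) else 0)
    + (if t[0]? = some c ∧ t[1]? = some c then G (t.drop 2) else 0)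
    + (if (c = '7' ∨ c = '9') ∧ t[0]? = some c ∧ t[1]? = some c ∧ t[2]? = some c
       then G (t.drop 3) else 0)
termination_by l => l.length
decreasing_by all_goals first | (simp; omega) | simp

theorem G_cons (c : Char) (t : List Char) :
    G (c :: t) = G t
    + (if t[0]? = some c then G (t.drop 1) else 0)
    + (if t[0]? = some c ∧ t[1]? = some c then G (t.drop 2) else 0)
    + (if (c = '7' ∨ c = '9') ∧ t[0]? = some c ∧ t[1]? = some c ∧ t[2]? = some c
       then G (t.drop 3) else 0) := by
  rw [G]

-- tilings of a run of length n into groups of size ≤ 3 (≤ 4 if `four`)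
def fRun (four : Bool) : Nat → Int
  | 0 => 1
  | 1 => 1
  | 2 => 2
  | 3 => 4
  | (n+4) => fRun four (n+3) + fRun four (n+2) + fRun four (n+1) + (if four then fRun four n else 0)

theorem G_rep1 (c : Char) (t : List Char) (h : t[0]? ≠ some c) : G (c :: t) = G t := by
  rw [G_cons]; simp [h]

theorem G_rep2 (c : Char) (t : List Char) (h : t[0]? ≠ some c) :
    G (c :: c :: t) = 2 * G t := by
  rw [G_cons]
  simp [h]
  rw [G_rep1 c t h]
  ring

theorem G_rep3 (c : Char) (t : List Char) (h : t[0]? ≠ some c) :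
    G (c :: c :: c :: t) = 4 * G t := by
  rw [G_cons]
  simp [h]
  rw [G_rep2 c t h, G_rep1 c t h]
  ring

-- key run lemma: G over `replicate m c ++ t` factors when t does not start with c
theorem G_rep (c : Char) (m : Nat) (t : List Char) (h : t[0]? ≠ some c) :
    G (List.replicate m c ++ t) = fRun (c == '7' || c == '9') m * G t := by
  induction m using Nat.strong_induction_on with
  | _ m ih =>
    match m with
    | 0 => simp [fRun]
    | 1 =>
      rw [show List.replicate 1 c ++ t = c :: t from rfl, G_rep1 c t h,
        show fRun (c == '7' || c == '9') 1 = 1 from rfl]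
      ring
    | 2 =>
      rw [show List.replicate 2 c ++ t = c :: c :: t from rfl, G_rep2 c t h,
        show fRun (c == '7' || c == '9') 2 = 2 from rfl]
    | 3 =>
      rw [show List.replicate 3 c ++ t = c :: c :: c :: t from rfl, G_rep3 c t h,
        show fRun (c == '7' || c == '9') 3 = 4 from rfl]
    | (k+4) =>
      rw [show List.replicate (k+4) c ++ t = c :: (List.replicate (k+3) c ++ t) from rfl,
        G_cons]
      have h0 : (List.replicate (k+3) c ++ t)[0]? = some c := by
        rw [List.getElem?_append_left (by simp)]; simp
      have h1 : (List.replicate (k+3) c ++ t)[1]? = some c := by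
        rw [List.getElem?_append_left (by simp)]; simp
      have h2 : (List.replicate (k+3) c ++ t)[2]? = some c := by
        rw [List.getElem?_append_left (by simp)]; simp
      have d1 : (List.replicate (k+3) c ++ t).drop 1 = List.replicate (k+2) c ++ t := by
        rw [List.drop_append_of_le_length (by simp), List.drop_replicate]
        first | rfl | (congr 1; omega)
      have d2 : (List.replicate (k+3) c ++ t).drop 2 = List.replicate (k+1) c ++ t := by
        rw [List.drop_append_of_le_length (by simp), List.drop_replicate]
        first | rfl | (congr 1; omega)
      have d3 : (List.replicate (k+3) c ++ t).drop 3 = List.replicate k c ++ t := by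
        rw [List.drop_append_of_le_length (by simp), List.drop_replicate]
        first | rfl | (congr 1; omega)
      rw [h0, h1, h2, d1, d2, d3,
        ih (k+3) (by omega), ih (k+2) (by omega), ih (k+1) (by omega)]
      simp only [and_true, if_pos rfl, true_and]
      by_cases hc : c = '7' ∨ c = '9'
      · have hb : (c == '7' || c == '9') = true := by
          rcases hc with h' | h' <;> simp [h']
        rw [if_pos hc, ih k (by omega), hb, fRun]
        simp only [if_true, if_pos rfl]
        ring
      · have hb : (c == '7' || c == '9') = false := by
          simp only [not_or] at hc
          simp [hc.1, hc.2]
        rw [if_neg hc, hb, fRun]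
        simp only [Bool.false_eq_true, if_false, if_true]
        ring

-- ===== A side =====
def dpList (cs : List Char) (j : Nat) : List Int :=
  (List.range (j+1)).map (fun i => G ((cs.take (j - i)).reverse))

theorem dpList_getD (cs : List Char) (j k : Nat) (hk : k ≤ j) :
    (dpList cs j).getD k 0 = G ((cs.take (j - k)).reverse) := by
  rw [dpList, List.getD_eq_getElem?_getD]
  have hk' : k < j + 1 := by omega
  simp [hk']

theorem dpList_cons (cs : List Char) (j : Nat) (hj : 1 ≤ j) :
    dpList cs j = G ((cs.take j).reverse) :: dpList cs (j-1) := by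
  rw [dpList, List.range_succ_eq_map, List.map_cons, List.map_map, dpList,
    show j - 1 + 1 = j by omega]
  refine congrArg₂ _ (by simp) (List.map_congr_left ?_)
  intro i _
  simp only [Function.comp_apply]
  rw [show j - Nat.succ i = j - 1 - i by omega]

theorem take_reverse_succ (cs : List Char) (j : Nat) (hj : j < cs.length) :
    (cs.take (j+1)).reverse = cs[j] :: (cs.take j).reverse := by
  rw [List.take_succ_eq_append_getElem hj, List.reverse_append]
  simp

theorem takeRev_getElem? (cs : List Char) (j k : Nat) (hk : k < j) (hj : j ≤ cs.length) :
    ((cs.take j).reverse)[k]? = some (cs[j-1-k]'(by omega)) := by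
  rw [List.getElem?_reverse (by simp [List.length_take]; omega)]
  rw [List.length_take]
  rw [List.getElem?_take_of_lt (by omega)]
  rw [List.getElem?_eq_getElem (by omega)]
  congr 2
  omega

theorem takeRev_getElem?_none (cs : List Char) (j k : Nat) (hk : j ≤ k) :
    ((cs.take j).reverse)[k]? = none := by
  apply List.getElem?_eq_none
  simp [List.length_take]
  omega

theorem takeRev_drop (cs : List Char) (j k : Nat) (hj : j ≤ cs.length) :
    (cs.take j).reverse.drop k = (cs.take (j - k)).reverse := by
  rw [List.drop_reverse]
  congr 1
  rw [List.take_take, List.length_take]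
  congr 1
  omega

theorem headD_dpList (cs : List Char) (j : Nat) (hj : 1 ≤ j) :
    (dpList cs j).headD 0 = G ((cs.take j).reverse) := by
  rw [dpList_cons cs j hj]
  rfl

theorem ifsum4 (x y z w : Char) (A0 A1 A2 A3 : Int) :
    A0 + (if x = y then A1 else 0) + (if x = y ∧ y = z then A2 else 0)
      + (if (x = '7' ∨ x = '9') ∧ x = y ∧ y = z ∧ z = w then A3 else 0)
    = A0 + (if y = x then A1 else 0) + (if y = x ∧ z = x then A2 else 0)
      + (if (x = '7' ∨ x = '9') ∧ y = x ∧ z = x ∧ w = x then A3 else 0) := by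
  by_cases h1 : x = y <;> by_cases h2 : y = z <;> by_cases h3 : z = w <;>
    simp_all [eq_comm]

theorem ifsum3 (x y z : Char) (A0 A1 A2 : Int) :
    A0 + (if x = y then A1 else 0) + (if x = y ∧ y = z then A2 else 0) + 0
    = A0 + (if y = x then A1 else 0) + (if y = x ∧ z = x then A2 else 0) + 0 := by
  by_cases h1 : x = y <;> by_cases h2 : y = z <;> simp_all [eq_comm]

theorem ifsum2 (x y : Char) (A0 A1 : Int) :
    A0 + (if x = y then A1 else 0) + 0 + 0 = A0 + (if y = x then A1 else 0) + 0 + 0 := by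
  by_cases h1 : x = y <;> simp_all [eq_comm]

theorem stepA_dpList (cs : List Char) (j : Nat) (h2 : 2 ≤ j) (hn : j ≤ cs.length) :
    stepA cs (dpList cs (j-1)) j = dpList cs j := by
  rw [dpList_cons cs j (by omega)]
  unfold stepA
  congr 1
  -- rewrite the RHS G into its one-step unfolding over q = (cs.take (j-1)).reverse
  have e : (cs.take j).reverse = cs[j-1]'(by omega) :: (cs.take (j-1)).reverse := by
    have h := take_reverse_succ cs (j-1) (by omega)
    rwa [show j-1+1 = j by omega] at h
  rw [e, G_cons]
  rw [takeRev_drop cs (j-1) 1 (by omega), takeRev_drop cs (j-1) 2 (by omega),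
    takeRev_drop cs (j-1) 3 (by omega)]
  rw [headD_dpList cs (j-1) (by omega)]
  rw [List.getD_eq_getElem cs ' ' (show j-1 < cs.length by omega),
      List.getD_eq_getElem cs ' ' (show j-2 < cs.length by omega)]
  rw [dpList_getD cs (j-1) 1 (by omega)]
  by_cases h4 : 4 ≤ j
  · -- all three option guards are `some`
    rw [takeRev_getElem? cs (j-1) 0 (by omega) (by omega),
        takeRev_getElem? cs (j-1) 1 (by omega) (by omega),
        takeRev_getElem? cs (j-1) 2 (by omega) (by omega)]
    rw [List.getD_eq_getElem cs ' ' (show j-3 < cs.length by omega),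
        List.getD_eq_getElem cs ' ' (show j-4 < cs.length by omega)]
    rw [dpList_getD cs (j-1) 2 (by omega), dpList_getD cs (j-1) 3 (by omega)]
    simp only [show j-1-1-0 = j-2 by omega, show j-1-1-1 = j-3 by omega,
        show j-1-1-2 = j-4 by omega, show j-1-1 = j-2 by omega,
        show j-1-2 = j-3 by omega, show j-1-3 = j-4 by omega]
    simp only [Option.some.injEq, show (1 < j) = True by simp; omega,
      show (2 < j) = True by simp; omega, show (3 < j) = True by simp; omega,
      true_and, and_true]
    exact ifsum4 _ _ _ _ _ _ _ _
  · by_cases h3 : 3 ≤ j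
    · -- j = 3 : third option guard is none
      rw [takeRev_getElem? cs (j-1) 0 (by omega) (by omega),
          takeRev_getElem? cs (j-1) 1 (by omega) (by omega),
          takeRev_getElem?_none cs (j-1) 2 (by omega)]
      rw [List.getD_eq_getElem cs ' ' (show j-3 < cs.length by omega)]
      rw [dpList_getD cs (j-1) 2 (by omega)]
      simp only [show j-1-1-0 = j-2 by omega, show j-1-1-1 = j-3 by omega,
          show j-1-1 = j-2 by omega, show j-1-2 = j-3 by omega]
      simp only [Option.some.injEq, show (1 < j) = True by simp; omega,
        show (2 < j) = True by simp; omega, show (3 < j) = False by simp; omega,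
        reduceCtorEq, true_and, and_true, false_and, and_false, if_false]
      exact ifsum3 _ _ _ _ _ _
    · -- j = 2 : second and third option guards are none
      rw [takeRev_getElem? cs (j-1) 0 (by omega) (by omega),
          takeRev_getElem?_none cs (j-1) 1 (by omega),
          takeRev_getElem?_none cs (j-1) 2 (by omega)]
      simp only [show j-1-1-0 = j-2 by omega, show j-1-1 = j-2 by omega]
      simp only [Option.some.injEq, show (1 < j) = True by simp; omega,
        show (2 < j) = False by simp; omega, show (3 < j) = False by simp; omega,
        reduceCtorEq, true_and, and_true, false_and, and_false, if_false]
      exact ifsum2 _ _ _ _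

theorem G_nil : G [] = 1 := by rw [G]

theorem G_short (l : List Char) (h : l.length ≤ 1) : G l = 1 := by
  match l, h with
  | [], _ => exact G_nil
  | [c], _ => rw [G_cons]; simp [G_nil]

theorem foldA (cs : List Char) (m : Nat) (hm : m + 1 ≤ cs.length) :
    (List.range' 2 m).foldl (stepA cs) [1, 1] = dpList cs (m+1) := by
  induction m with
  | zero =>
    simp only [List.range'_zero, List.foldl_nil]
    rw [dpList, show List.range (0+1+1) = [0, 1] from rfl]
    simp only [List.map_cons, List.map_nil, Nat.sub_zero, Nat.sub_self, List.take_zero,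
      List.reverse_nil, G_nil]
    rw [G_short _ (by simp [List.length_take])]
  | succ m ih =>
    rw [List.range'_1_concat, List.foldl_append, ih (by omega)]
    simp only [List.foldl_cons, List.foldl_nil]
    have h := stepA_dpList cs (m+2) (by omega) (by omega)
    rw [show m+2-1 = m+1 by omega] at h
    rw [show 2+m = m+2 by omega, h]

theorem portA_eq_G (s : String) (hne : s.toList ≠ []) :
    solution_1563_3 s = G s.toList.reverse % 1000000007 := by
  simp only [solution_1563_3]
  have hlen : 1 ≤ s.toList.length := List.length_pos_iff.mpr hne
  rw [foldA s.toList (s.toList.length - 1) (by omega)]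
  rw [headD_dpList s.toList _ (by omega), show s.toList.length - 1 + 1 = s.toList.length by omega,
    List.take_length]

-- ===== B side =====
def rDecode (r : List (Char × Nat)) : List Char := r.flatMap (fun p => List.replicate p.2 p.1)
def rProd (r : List (Char × Nat)) : Int :=
  r.foldl (fun t p => t * fRun (p.1 == '7' || p.1 == '9') p.2) 1
def rValid (r : List (Char × Nat)) : Prop :=
  (∀ p ∈ r, 1 ≤ p.2) ∧ List.IsChain (fun p q => p.1 ≠ q.1) r

def fm (four : Bool) (L j : Nat) : Int := if j ≤ L then fRun four (L - j) else 0

theorem fold4 (four : Bool) (L : Nat) :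
    (List.range L).foldl
      (fun (s : Int × Int × Int × Int) _ =>
        (s.2.1, s.2.2.1, s.2.2.2, s.2.1 + s.2.2.1 + s.2.2.2 + (if four then s.1 else 0)))
      (0, 0, 0, 1)
    = (fm four L 3, fm four L 2, fm four L 1, fRun four L) := by
  induction L with
  | zero => simp [fm, fRun]
  | succ L ih =>
    rw [List.range_succ, List.foldl_append, ih]
    simp only [List.foldl_cons, List.foldl_nil, Prod.mk.injEq]
    refine ⟨?_, ?_, ?_, ?_⟩
    · simp only [fm]
      split_ifs <;> first | rfl | omega
    · simp only [fm]
      split_ifs <;> first | rfl | omega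
    · simp only [fm]
      split_ifs <;> first | rfl | omega
    · match L with
      | 0 => simp [fm, fRun]
      | 1 => simp [fm, fRun]
      | 2 => simp [fm, fRun]
      | (m+3) =>
        have e1 : fm four (m+3) 2 = fRun four (m+1) := by
          unfold fm; rw [if_pos (by omega)]; congr 1
        have e2 : fm four (m+3) 1 = fRun four (m+2) := by
          unfold fm; rw [if_pos (by omega)]; congr 1
        have e3 : fm four (m+3) 3 = fRun four m := by
          unfold fm; rw [if_pos (by omega)]; congr 1
        rw [e1, e2, e3, show m+3+1 = m+4 from rfl, fRun]
        ring

theorem altTilings_eq (four : Bool) (L : Nat) : altTilings four L = fRun four L := by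
  unfold altTilings
  rw [fold4]

theorem rDecode_append (r q : List (Char × Nat)) :
    rDecode (r ++ q) = rDecode r ++ rDecode q := by
  simp [rDecode]

theorem rDecode_head (r : List (Char × Nat)) (p : Char × Nat) (hp : 1 ≤ p.2) :
    ((rDecode (r ++ [p])).reverse).head? = some p.1 := by
  obtain ⟨c, n⟩ := p
  match n, hp with
  | (n+1), _ =>
    rw [rDecode_append, List.reverse_append]
    simp [rDecode, List.replicate_succ, List.reverse_replicate]
    cases n <;> rfl

theorem rProd_append_singleton (r : List (Char × Nat)) (p : Char × Nat) :
    rProd (r ++ [p]) = rProd r * fRun (p.1 == '7' || p.1 == '9') p.2 := by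
  simp [rProd, List.foldl_append]

theorem rValid_drop_last (r : List (Char × Nat)) (p : Char × Nat) (hv : rValid (r ++ [p])) :
    rValid r := by
  obtain ⟨hc, hch⟩ := hv
  exact ⟨fun q hq => hc q (by simp [hq]), (List.isChain_append.mp hch).1⟩

theorem G_rDecode (r : List (Char × Nat)) (hv : rValid r) :
    G ((rDecode r).reverse) = rProd r := by
  induction r using List.reverseRecOn with
  | nil => simp [rDecode, rProd, G_nil]
  | append_singleton r p ih =>
    have hvr : rValid r := rValid_drop_last r p hv
    have hp : 1 ≤ p.2 := hv.1 p (by simp)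
    have hhead : ((rDecode r).reverse)[0]? ≠ some p.1 := by
      rcases List.eq_nil_or_concat r with rfl | ⟨r', q, rfl⟩
      · simp [rDecode]
      · simp only [List.concat_eq_append] at hv hvr ⊢
        have hq : 1 ≤ q.2 := hvr.1 q (by simp)
        rw [← List.head?_eq_getElem?, rDecode_head r' q hq]
        have hne : q.1 ≠ p.1 := by
          have := (List.isChain_append.mp hv.2).2.2
          exact this q (by simp) p (by simp)
        simp [hne]
    rw [rDecode_append, List.reverse_append,
      show rDecode [p] = List.replicate p.2 p.1 by simp [rDecode],
      List.reverse_replicate, G_rep p.1 p.2 _ hhead, ih hvr, rProd_append_singleton]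
    ring

theorem rValid_bump (acc : List (Char × Nat)) (cur : Char) (cnt : Nat)
    (hv : rValid (acc ++ [(cur, cnt)])) : rValid (acc ++ [(cur, cnt + 1)]) := by
  obtain ⟨hc, hch⟩ := hv
  constructor
  · intro p hp
    rcases List.mem_append.mp hp with h | h
    · exact hc p (by simp [h])
    · simp at h; simp [h]
  · have h := List.isChain_append.mp hch
    exact List.isChain_append.mpr ⟨h.1, by simp, by simpa using h.2.2⟩

theorem rValid_push (acc : List (Char × Nat)) (cur ch : Char) (cnt : Nat)
    (hv : rValid (acc ++ [(cur, cnt)])) (hne : ch ≠ cur) :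
    rValid ((acc ++ [(cur, cnt)]) ++ [(ch, 1)]) := by
  obtain ⟨hc, hch⟩ := hv
  constructor
  · intro p hp
    rcases List.mem_append.mp hp with h | h
    · exact hc p h
    · simp at h; simp [h]
  · refine List.isChain_append.mpr ⟨hch, by simp, ?_⟩
    intro x hx y hy
    rw [List.getLast?_concat] at hx
    simp at hx hy
    subst hx; subst hy
    simpa using hne.symm

theorem rDecode_bump (acc : List (Char × Nat)) (cur : Char) (cnt : Nat) :
    rDecode (acc ++ [(cur, cnt + 1)]) = rDecode (acc ++ [(cur, cnt)]) ++ [cur] := by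
  rw [rDecode_append, rDecode_append]
  simp [rDecode, List.replicate_succ']

theorem rDecode_push (l : List (Char × Nat)) (ch : Char) :
    rDecode (l ++ [(ch, 1)]) = rDecode l ++ [ch] := by
  rw [rDecode_append]; simp [rDecode]

theorem runs_fold (rest : List Char) :
    ∀ (acc : List (Char × Nat)) (cur : Char) (cnt : Nat), 1 ≤ cnt →
      rValid (acc ++ [(cur, cnt)]) →
      (let F := rest.foldl stepR (acc, cur, cnt);
       rValid (F.1 ++ [(F.2.1, F.2.2)]) ∧
       rDecode (F.1 ++ [(F.2.1, F.2.2)]) = rDecode (acc ++ [(cur, cnt)]) ++ rest) := by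
  induction rest with
  | nil => intro acc cur cnt h1 hv; exact ⟨hv, by simp⟩
  | cons ch rest ih =>
    intro acc cur cnt h1 hv
    simp only [List.foldl_cons]
    by_cases hc : ch = cur
    · rw [show stepR (acc, cur, cnt) ch = (acc, cur, cnt + 1) by simp [stepR, hc]]
      have h := ih acc cur (cnt + 1) (by omega) (rValid_bump acc cur cnt hv)
      refine ⟨h.1, ?_⟩
      rw [h.2, rDecode_bump, hc]
      simp
    · rw [show stepR (acc, cur, cnt) ch = (acc ++ [(cur, cnt)], ch, 1) by simp [stepR, hc]]
      have h := ih (acc ++ [(cur, cnt)]) ch 1 (by omega) (rValid_push acc cur ch cnt hv hc)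
      refine ⟨h.1, ?_⟩
      rw [h.2, rDecode_push]
      simp

theorem portB_eq_G (s : String) (hne : s.toList ≠ []) :
    solution_1563_3_alt s = G s.toList.reverse % 1000000007 := by
  obtain ⟨c0, rest, hs⟩ : ∃ c0 rest, s.toList = c0 :: rest := by
    cases h : s.toList with
    | nil => exact absurd h hne
    | cons a l => exact ⟨a, l, rfl⟩
  unfold solution_1563_3_alt
  rw [hs]
  simp only [List.foldl_cons]
  rw [show stepR ([], c0, 0) c0 = (([] : List (Char × Nat)), c0, 1) by simp [stepR]]
  have hv0 : rValid (([] : List (Char × Nat)) ++ [(c0, 1)]) := by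
    constructor
    · intro p hp; simp at hp; simp [hp]
    · simp
  have h := runs_fold rest [] c0 1 (by omega) hv0
  set F := rest.foldl stepR (([] : List (Char × Nat)), c0, 1) with hF
  have hdec : rDecode (F.1 ++ [(F.2.1, F.2.2)]) = c0 :: rest := by
    rw [h.2]; simp [rDecode]
  have htot : (F.1 ++ [(F.2.1, F.2.2)]).foldl
      (fun (t : Int) p => t * altTilings (p.1 == '7' || p.1 == '9') p.2) 1
      = rProd (F.1 ++ [(F.2.1, F.2.2)]) := by
    unfold rProd
    simp only [altTilings_eq]
  rw [htot, ← G_rDecode (F.1 ++ [(F.2.1, F.2.2)]) h.1, hdec]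

-- ===== VERDICT (by name: the statement is the Claim_ definition above) =====
theorem solution_1563_3_spec : Claim_equal_solution_1563_3 := by
  intro s _ hpre
  unfold Spec_solution_1563_3
  have hne : s.toList ≠ [] := fun h => hpre (String.toList_eq_nil_iff.mp h)
  rw [portA_eq_G s hne, portB_eq_G s hne]
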